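-- pv_equiv track=rewrite | github.com/samarthjain2002/Leetcode-Solutions | Medium/[2849] Determine if a Cell Is Reachable at a Given Time/Failed attempts.py | isReachableAtTime
-- ===== SOURCE A (Python) =====
-- def isReachableAtTime(sx: int, sy: int, fx: int, fy: int, t: int) -> bool:
--     if sx == fx and sy == fy and t == 1:       #Start is Finish
--         return False
--     while sy != fy:
--         if t == 0:
--             return False
--         t -= 1
--         #Moving diagonally
--         if sx < fx:     #Start is to the left of Finish
--             if sy < fy:     #Start is North-West of Finish
--                 sx += 1
--                 sy += 1
--             else:           #Start is South-West Finish
--                 sx += 1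
--                 sy -= 1
--         elif sx > fx:   #Start is to the right of Finish
--             if sy < fy:     #Start is North-East of Finish
--                 sx -= 1
--                 sy += 1
--             else:           #Start is South-East of Finish
--                 sx -= 1
--                 sy -= 1
--         #Moving downwards
--         else:           #Start is vertically alligned with Finsih
--             if sy < fy:     #Start is directly above Finish
--                 sy += 1
--             else:           #Start is directly below Finish
--                 sy -= 1
--
--     while sx != fx:
--         if t == 0:
--             return False
--         t -= 1
--         #Start is horizontally alligned with Finish
--         if sx < fx:     #Start is left of Finish
--             sx += 1
--         else:           #Start is right of Finish
--             sx -= 1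
--
--     return True
-- ===== SOURCE B (Python) =====
-- def isReachableAtTime(sx: int, sy: int, fx: int, fy: int, t: int) -> bool:
--     # O(1): Chebyshev distance instead of step-by-step simulation
--     d = max(abs(sx - fx), abs(sy - fy))
--     if d == 0:
--         return t != 1
--     return t >= d
-- ===== Notes on version B (the rewrite author's own statement) =====
-- stated objective: faster
-- what changed: Replaces A's step-by-step walk (two while loops decrementing t) by the closed-form Chebyshev-distance test max(|dx|,|dy|) <= t with the t==1 special case for equal cells.
-- outside the precondition, e.g. on isReachableAtTime(0, 0, 1, 1, -1): A returns True, B returns False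
import Mathlib
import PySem

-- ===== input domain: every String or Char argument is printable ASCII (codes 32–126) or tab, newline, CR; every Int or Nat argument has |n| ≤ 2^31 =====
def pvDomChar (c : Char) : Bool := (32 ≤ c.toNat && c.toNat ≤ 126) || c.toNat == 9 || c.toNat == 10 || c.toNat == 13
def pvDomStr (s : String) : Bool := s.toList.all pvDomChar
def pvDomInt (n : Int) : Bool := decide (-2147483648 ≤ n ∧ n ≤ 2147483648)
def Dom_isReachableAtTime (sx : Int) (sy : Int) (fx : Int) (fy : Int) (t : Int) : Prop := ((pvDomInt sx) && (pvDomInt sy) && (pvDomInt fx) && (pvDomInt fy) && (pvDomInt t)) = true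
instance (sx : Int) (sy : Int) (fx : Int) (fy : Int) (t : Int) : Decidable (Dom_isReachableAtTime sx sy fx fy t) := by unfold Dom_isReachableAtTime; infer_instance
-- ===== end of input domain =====

-- B replaces A's step-by-step walk by the closed-form Chebyshev-distance test (O(1) vs O(distance)).

-- ===== PORT A =====
-- second while-loop of A: move sx one step toward fx, decrementing t.
-- fuel = (fx - sx).natAbs, the exact number of iterations the Python while-loop performs
-- (the guard sx ≠ fx is false exactly when fuel is 0), so this structural recursion is the loop step for step.
def pvLoopX (fuel : Nat) (sx : Int) (fx : Int) (t : Int) : Bool :=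
  match fuel with
  | 0 => true
  | n + 1 =>
    if sx ≠ fx then
      if t = 0 then false
      else
        if sx < fx then pvLoopX n (sx + 1) fx (t - 1)
        else pvLoopX n (sx - 1) fx (t - 1)
    else true

-- first while-loop of A (diagonal/vertical step toward the target), falling through to the second loop;
-- fuel = (fy - sy).natAbs, the exact iteration count of the Python while-loop.
def pvLoopY (fuel : Nat) (sx : Int) (sy : Int) (fx : Int) (fy : Int) (t : Int) : Bool :=
  match fuel with
  | 0 => pvLoopX (fx - sx).natAbs sx fx t
  | n + 1 =>
    if sy ≠ fy then
      if t = 0 then false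
      else
        if sx < fx then
          if sy < fy then pvLoopY n (sx + 1) (sy + 1) fx fy (t - 1)
          else pvLoopY n (sx + 1) (sy - 1) fx fy (t - 1)
        else if sx > fx then
          if sy < fy then pvLoopY n (sx - 1) (sy + 1) fx fy (t - 1)
          else pvLoopY n (sx - 1) (sy - 1) fx fy (t - 1)
        else
          if sy < fy then pvLoopY n sx (sy + 1) fx fy (t - 1)
          else pvLoopY n sx (sy - 1) fx fy (t - 1)
    else pvLoopX (fx - sx).natAbs sx fx t

def isReachableAtTime (sx : Int) (sy : Int) (fx : Int) (fy : Int) (t : Int) : Bool :=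
  if sx = fx ∧ sy = fy ∧ t = 1 then false
  else pvLoopY (fy - sy).natAbs sx sy fx fy t

-- ===== PORT B =====
def isReachableAtTime_alt (sx : Int) (sy : Int) (fx : Int) (fy : Int) (t : Int) : Bool :=
  let d : Int := max |sx - fx| |sy - fy|
  if d = 0 then t ≠ 1
  else decide (t ≥ d)

-- ===== PRECONDITION & SPEC =====
-- Pre_ restricts to the problem's natural domain t ≥ 0 (LeetCode guarantees t ≥ 1): for negative t
-- A's countdown never reaches 0, so A accidentally returns True, while B naturally returns False.
def Pre_isReachableAtTime (sx : Int) (sy : Int) (fx : Int) (fy : Int) (t : Int) : Prop := 0 ≤ t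
instance (sx : Int) (sy : Int) (fx : Int) (fy : Int) (t : Int) : Decidable (Pre_isReachableAtTime sx sy fx fy t) := by unfold Pre_isReachableAtTime; infer_instance
def pvWitness_isReachableAtTime : Int × Int × Int × Int × Int := (0, 0, 2, 3, 5)

def Spec_isReachableAtTime (sx : Int) (sy : Int) (fx : Int) (fy : Int) (t : Int) (out : Bool) : Prop := out = isReachableAtTime_alt sx sy fx fy t
instance (sx : Int) (sy : Int) (fx : Int) (fy : Int) (t : Int) (out : Bool) : Decidable (Spec_isReachableAtTime sx sy fx fy t out) := by unfold Spec_isReachableAtTime; infer_instance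

-- ===== CLAIM (what is proved, stated in full; the proofs are below) =====
def Claim_equal_isReachableAtTime : Prop := ∀ (sx : Int) (sy : Int) (fx : Int) (fy : Int) (t : Int), Dom_isReachableAtTime sx sy fx fy t → Pre_isReachableAtTime sx sy fx fy t → Spec_isReachableAtTime sx sy fx fy t (isReachableAtTime sx sy fx fy t)

-- ===== LEMMAS AND PROOFS =====
theorem pvLoopX_eq (n : Nat) : ∀ (sx fx t : Int), (fx - sx).natAbs = n → 0 ≤ t →
    pvLoopX n sx fx t = decide (((fx - sx).natAbs : Int) ≤ t) := by
  induction n with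
  | zero =>
    intro sx fx t hn ht
    simp only [pvLoopX]
    symm; rw [decide_eq_true_eq]; omega
  | succ n ih =>
    intro sx fx t hn ht
    have hne : sx ≠ fx := by omega
    simp only [pvLoopX]
    rw [if_pos hne]
    by_cases ht0 : t = 0
    · rw [if_pos ht0]
      symm; rw [decide_eq_false_iff_not]; omega
    · rw [if_neg ht0]
      by_cases hlt : sx < fx
      · rw [if_pos hlt, ih (sx + 1) fx (t - 1) (by omega) (by omega)]
        rw [decide_eq_decide]; omega
      · rw [if_neg hlt, ih (sx - 1) fx (t - 1) (by omega) (by omega)]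
        rw [decide_eq_decide]; omega

theorem pvLoopY_eq (n : Nat) : ∀ (sx sy fx fy t : Int), (fy - sy).natAbs = n → 0 ≤ t →
    pvLoopY n sx sy fx fy t = decide (max ((fx - sx).natAbs : Int) ((fy - sy).natAbs : Int) ≤ t) := by
  induction n with
  | zero =>
    intro sx sy fx fy t hn ht
    simp only [pvLoopY]
    rw [pvLoopX_eq (fx - sx).natAbs sx fx t rfl ht]
    rw [decide_eq_decide]; omega
  | succ n ih =>
    intro sx sy fx fy t hn ht
    have hne : sy ≠ fy := by omega
    simp only [pvLoopY]
    rw [if_pos hne]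
    by_cases ht0 : t = 0
    · rw [if_pos ht0]
      symm; rw [decide_eq_false_iff_not]; omega
    · rw [if_neg ht0]
      have ht1 : (0:Int) ≤ t - 1 := by omega
      rcases lt_trichotomy sx fx with hx | hx | hx
      · rw [if_pos hx]
        by_cases hy : sy < fy
        · rw [if_pos hy, ih (sx + 1) (sy + 1) fx fy (t - 1) (by omega) ht1]
          rw [decide_eq_decide]; omega
        · rw [if_neg hy, ih (sx + 1) (sy - 1) fx fy (t - 1) (by omega) ht1]
          rw [decide_eq_decide]; omega
      · rw [if_neg (by omega : ¬ sx < fx), if_neg (by omega : ¬ sx > fx)]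
        by_cases hy : sy < fy
        · rw [if_pos hy, ih sx (sy + 1) fx fy (t - 1) (by omega) ht1]
          rw [decide_eq_decide]; omega
        · rw [if_neg hy, ih sx (sy - 1) fx fy (t - 1) (by omega) ht1]
          rw [decide_eq_decide]; omega
      · rw [if_neg (by omega : ¬ sx < fx), if_pos (by omega : sx > fx)]
        by_cases hy : sy < fy
        · rw [if_pos hy, ih (sx - 1) (sy + 1) fx fy (t - 1) (by omega) ht1]
          rw [decide_eq_decide]; omega
        · rw [if_neg hy, ih (sx - 1) (sy - 1) fx fy (t - 1) (by omega) ht1]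
          rw [decide_eq_decide]; omega

theorem isReachableAtTime_spec : Claim_equal_isReachableAtTime := by
  intro sx sy fx fy t _ hpre
  have ht : (0:Int) ≤ t := hpre
  unfold Spec_isReachableAtTime isReachableAtTime isReachableAtTime_alt
  rw [pvLoopY_eq (fy - sy).natAbs sx sy fx fy t rfl ht]
  simp only [Int.abs_eq_natAbs]
  by_cases heq : sx = fx ∧ sy = fy ∧ t = 1
  · obtain ⟨h1, h2, h3⟩ := heq
    rw [if_pos ⟨h1, h2, h3⟩, if_pos (by omega)]
    subst h1 h2 h3; simp
  · rw [if_neg heq]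
    by_cases hd : max (((sx - fx).natAbs : Nat) : Int) (((sy - fy).natAbs : Nat) : Int) = 0
    · rw [if_pos hd]
      have h1 : sx = fx := by omega
      have h2 : sy = fy := by omega
      have h3 : t ≠ 1 := fun h => heq ⟨h1, h2, h⟩
      rw [decide_eq_decide]
      constructor
      · intro _; exact h3
      · intro _; omega
    · rw [if_neg hd, decide_eq_decide]; omega
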